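-- pv_equiv track=rewrite | github.com/koshitashiro/RPA | src/file/file_act.py | getLineLst_FromData
-- ===== SOURCE A (Python) =====
-- def getLineLst_FromData(fdata):
--
--     Lst  = []
--     line = ""
--
--     for i  in range(len(fdata)):
--         if fdata[i] != "\n" and i != len(fdata)-1:
--             line += fdata[i]
--         else:
--             if i == len(fdata)-1:
--                 line += fdata[i]
--                 line = line.strip("\n")
--
--             if chkRemLine(line) == True:
--                 line = ""
--                 continue
--
--             remEmpty(line)
--             Lst.append(line)
--             line = ""
--
--     return Lst
--
-- def chkRemLine(line):
--
--     Lst = ["\n", "#"]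
--
--     for cmp in Lst:
--         if line[0] == cmp:
--             return True
--
--     return False
--
-- def remEmpty(line):
--
--     Lst = [" ", "　", "\t", "\n"]
--
--     for emp in Lst:
--         line.strip(emp)
--
--     return line
-- ===== SOURCE B (Python) =====
-- def getLineLst_FromData(fdata):
--     if fdata == "":
--         return []
--     lines = fdata.split("\n")
--     if lines[-1] == "":
--         lines.pop()
--     # line[0] deliberately raises IndexError on an empty segment, as A does
--     return [line for line in lines if line[0] != "#"]
-- ===== Notes on version B (the rewrite author's own statement) =====
-- stated objective: idiomatic
-- what changed: Replaces A's character-by-character index loop with an accumulator and a manual last-index special case by one str.split(' '), dropping the empty piece a trailing newline leaves, and a single line-level filter comprehension; Pre_ excludes only inputs with an empty line segment, on which both A and B raise IndexError.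
import Mathlib
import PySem

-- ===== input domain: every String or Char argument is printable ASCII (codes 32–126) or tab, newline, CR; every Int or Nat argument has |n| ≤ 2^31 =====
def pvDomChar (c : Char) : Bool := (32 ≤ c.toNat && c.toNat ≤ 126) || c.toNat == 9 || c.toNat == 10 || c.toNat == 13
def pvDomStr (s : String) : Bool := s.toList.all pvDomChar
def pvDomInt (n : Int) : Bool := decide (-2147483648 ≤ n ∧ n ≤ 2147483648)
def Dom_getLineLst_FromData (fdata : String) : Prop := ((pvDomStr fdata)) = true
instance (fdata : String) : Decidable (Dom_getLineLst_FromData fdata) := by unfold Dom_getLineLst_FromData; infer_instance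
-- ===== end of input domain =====

-- B replaces A's character-by-character index loop by split-on-newline, drop the
-- trailing empty piece, and one line-level filter (objective: idiomatic); Pre_
-- excludes inputs with an empty line segment, on which both Pythons raise IndexError.


-- ===== PORT A =====

-- chkRemLine: line[0] == "\n" or "#"; Python raises IndexError on line = "" (excluded by Pre_)
def pvChkRemLine (line : List Char) : Bool :=
  match line with
  | [] => false
  | c :: _ => if c = '\n' then true else if c = '#' then true else false

-- line.strip("\n"): drop '\n' from both ends (exact for lines, which contain no interior '\n')
def pvStripNL (l : List Char) : List Char :=
  ((l.dropWhile (· == '\n')).reverse.dropWhile (· == '\n')).reverse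

-- remEmpty: calls line.strip(...) but discards every result — a no-op on its argument
def pvRemEmpty (line : List Char) : List Char := line

-- the body of A's for-loop over i in range(len(fdata)); state = (Lst, line)
def pvStepA (cs : List Char) (st : List (List Char) × List Char) (i : Nat) : List (List Char) × List Char :=
  let c := cs.getD i ' '
  if c ≠ '\n' ∧ i ≠ cs.length - 1 then (st.1, st.2 ++ [c])
  else
    let line := if i = cs.length - 1 then pvStripNL (st.2 ++ [c]) else st.2
    if pvChkRemLine line then (st.1, [])
    else
      let line := pvRemEmpty line
      (st.1 ++ [line], [])

def getLineLst_FromData (fdata : String) : List String :=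
  (((List.range fdata.toList.length).foldl (pvStepA fdata.toList) ([], [])).1).map
    (fun l => String.ofList l)

-- ===== PORT B =====

-- hand port of Python's fdata.split("\n") (exact: single-char separator)
def pvSplitNL : List Char → List (List Char)
  | [] => [[]]
  | c :: rest =>
      if c = '\n' then [] :: pvSplitNL rest
      else
        match pvSplitNL rest with
        | [] => [[c]]
        | h :: t => (c :: h) :: t

def getLineLst_FromData_alt (fdata : String) : List String :=
  if fdata = "" then []
  else
    let lines := pvSplitNL fdata.toList
    -- if lines[-1] == "": lines.pop()
    let lines2 := if lines.getLast? = some [] then lines.dropLast else lines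
    -- [line for line in lines if line[0] != '#']; line[0] raises on "" (excluded by Pre_)
    (lines2.filter (fun l => decide (l.headD '#' ≠ '#'))).map (fun l => String.ofList l)

-- ===== PRECONDITION & SPEC =====

-- the line segments of fdata: split on '\n', dropping the empty piece a trailing newline leaves
def pvSegs (cs : List Char) : List (List Char) :=
  let ls := pvSplitNL cs
  if ls.getLast? = some [] then ls.dropLast else ls

-- Pre_ excludes exactly the inputs with an empty line segment, on which A (and B) raise IndexError in chkRemLine / line[0]
def Pre_getLineLst_FromData (fdata : String) : Prop :=
  fdata.toList = [] ∨ ∀ s ∈ pvSegs fdata.toList, s ≠ []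

instance (fdata : String) : Decidable (Pre_getLineLst_FromData fdata) := by
  unfold Pre_getLineLst_FromData; infer_instance

def pvWitness_getLineLst_FromData : String := "# comment\nabc\ndef x\n"

def Spec_getLineLst_FromData (fdata : String) (out : List String) : Prop := out = getLineLst_FromData_alt fdata
instance (fdata : String) (out : List String) : Decidable (Spec_getLineLst_FromData fdata out) := by unfold Spec_getLineLst_FromData; infer_instance

-- ===== CLAIM (what is proved, stated in full; the proofs are below) =====
def Claim_equal_getLineLst_FromData : Prop := ∀ (fdata : String), Dom_getLineLst_FromData fdata → Pre_getLineLst_FromData fdata → Spec_getLineLst_FromData fdata (getLineLst_FromData fdata)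

-- ===== LEMMAS AND PROOFS =====

-- A's loop as structural recursion on the remaining characters
def pvGoA (line : List Char) (cs : List Char) : List (List Char) :=
  match cs with
  | [] => []
  | [c] =>
      let l' := pvStripNL (line ++ [c])
      if pvChkRemLine l' then [] else [l']
  | c :: rest =>
      if c ≠ '\n' then pvGoA (line ++ [c]) rest
      else if pvChkRemLine line then pvGoA [] rest
      else line :: pvGoA [] rest

theorem pvDropWhile_nl_eq_self (l : List Char) (h : '\n' ∉ l) :
    l.dropWhile (· == '\n') = l := by
  cases l with
  | nil => rfl
  | cons x t =>
      have hx : x ≠ '\n' := fun e => h (by simp [e])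
      simp [List.dropWhile_cons, hx]

theorem pvStripNL_no_nl (l : List Char) (h : '\n' ∉ l) : pvStripNL l = l := by
  unfold pvStripNL
  rw [pvDropWhile_nl_eq_self l h, pvDropWhile_nl_eq_self _ (by simpa using h),
    List.reverse_reverse]

theorem pvStripNL_append_nl (l : List Char) (h : '\n' ∉ l) :
    pvStripNL (l ++ ['\n']) = l := by
  cases l with
  | nil => rfl
  | cons x t =>
      have hx : x ≠ '\n' := fun e => h (by simp [e])
      unfold pvStripNL
      have h1 : List.dropWhile (· == '\n') ((x :: t) ++ ['\n']) = (x :: t) ++ ['\n'] := by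
        rw [List.cons_append, List.dropWhile_cons]
        simp [hx]
      rw [h1, List.reverse_append]
      have h2 : (['\n'] : List Char).reverse = ['\n'] := rfl
      rw [h2, List.singleton_append, List.dropWhile_cons]
      simp only [beq_self_eq_true, if_true]
      rw [pvDropWhile_nl_eq_self _ (by simp only [List.mem_reverse]; exact h),
        List.reverse_reverse]

theorem pvSplitNL_ne_nil (cs : List Char) : pvSplitNL cs ≠ [] := by
  cases cs with
  | nil => simp [pvSplitNL]
  | cons c rest =>
      simp only [pvSplitNL]
      split
      · simp
      · split <;> simp

theorem pvSplitNL_no_nl (l : List Char) (h : '\n' ∉ l) : pvSplitNL l = [l] := by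
  induction l with
  | nil => rfl
  | cons x t ih =>
      have hx : x ≠ '\n' := fun e => h (by simp [e])
      have ht : pvSplitNL t = [t] := ih (fun m => h (List.mem_cons_of_mem _ m))
      simp [pvSplitNL, hx, ht]

theorem pvSplitNL_append_nl (l : List Char) (h : '\n' ∉ l) (r : List Char) :
    pvSplitNL (l ++ '\n' :: r) = l :: pvSplitNL r := by
  induction l with
  | nil => simp [pvSplitNL]
  | cons x t ih =>
      have hx : x ≠ '\n' := fun e => h (by simp [e])
      have ht := ih (fun m => h (List.mem_cons_of_mem _ m))
      simp [pvSplitNL, hx, ht]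

theorem pvSegs_nil : pvSegs [] = [] := rfl

theorem pvSegs_no_nl (l : List Char) (h : '\n' ∉ l) (hne : l ≠ []) :
    pvSegs l = [l] := by
  unfold pvSegs
  rw [pvSplitNL_no_nl l h]
  simp [hne]

theorem pvSegs_append_nl (l : List Char) (h : '\n' ∉ l) (r : List Char) :
    pvSegs (l ++ '\n' :: r) = l :: pvSegs r := by
  unfold pvSegs
  rw [pvSplitNL_append_nl l h r]
  obtain ⟨y, ys, hy⟩ : ∃ y ys, pvSplitNL r = y :: ys := by
    cases hr : pvSplitNL r with
    | nil => exact absurd hr (pvSplitNL_ne_nil r)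
    | cons y ys => exact ⟨y, ys, rfl⟩
  rw [hy]
  by_cases hc : (y :: ys).getLast? = some []
  · simp [List.getLast?_cons_cons, hc]
  · simp [List.getLast?_cons_cons, hc]

-- step of A's loop shifts down by one index when the head character is removed
theorem pvStepA_shift (c : Char) (r₁ : Char) (r' : List Char)
    (st : List (List Char) × List Char) (j : Nat) :
    pvStepA (c :: r₁ :: r') st (j + 1) = pvStepA (r₁ :: r') st j := by
  simp only [pvStepA, List.getD_cons_succ, List.length_cons, Nat.add_sub_cancel,
    ne_eq, Nat.add_left_inj]

theorem pvFoldA (cs : List Char) : ∀ (line : List Char) (Lst : List (List Char)),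
    ((List.range cs.length).foldl (pvStepA cs) (Lst, line)).1 = Lst ++ pvGoA line cs := by
  induction cs with
  | nil => intro line Lst; simp [pvGoA]
  | cons c cs' ih =>
      intro line Lst
      rw [List.length_cons, List.range_succ_eq_map, List.foldl_cons, List.foldl_map]
      cases cs' with
      | nil =>
          simp only [List.length_nil, List.range_zero, List.foldl_nil]
          by_cases hchk : pvChkRemLine (pvStripNL (line ++ [c])) <;>
            simp [pvStepA, pvGoA, pvRemEmpty, hchk]
      | cons r₁ r' =>
          have hcongr : (List.range (r₁ :: r').length).foldl
              (fun st j => pvStepA (c :: r₁ :: r') st (j + 1))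
              (pvStepA (c :: r₁ :: r') (Lst, line) 0) =
              (List.range (r₁ :: r').length).foldl (pvStepA (r₁ :: r'))
              (pvStepA (c :: r₁ :: r') (Lst, line) 0) :=
            PySem.List.foldl_congr_mem (List.range (r₁ :: r').length)
              (fun st j => pvStepA (c :: r₁ :: r') st (j + 1)) (pvStepA (r₁ :: r'))
              (pvStepA (c :: r₁ :: r') (Lst, line) 0)
              (fun acc x _ => pvStepA_shift c r₁ r' acc x)
          simp only [Nat.succ_eq_add_one] at *
          rw [hcongr]
          have hlen : (c :: r₁ :: r').length - 1 = r'.length + 1 := by simp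
          by_cases hc : c = '\n'
          · subst hc
            by_cases hchk : pvChkRemLine line
            · have hstep : pvStepA ('\n' :: r₁ :: r') (Lst, line) 0 = (Lst, []) := by
                simp [pvStepA, hchk]
              rw [hstep, ih [] Lst]
              simp [pvGoA, hchk]
            · have hstep : pvStepA ('\n' :: r₁ :: r') (Lst, line) 0 = (Lst ++ [line], []) := by
                simp [pvStepA, hchk, pvRemEmpty]
              rw [hstep, ih [] (Lst ++ [line])]
              simp [pvGoA, hchk]
          · have hstep : pvStepA (c :: r₁ :: r') (Lst, line) 0 = (Lst, line ++ [c]) := by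
              simp [pvStepA, hc]
            rw [hstep, ih (line ++ [c]) Lst]
            simp [pvGoA, hc]

theorem pvGoA_segs : ∀ (cs line : List Char), cs ≠ [] → '\n' ∉ line →
    (∀ s ∈ pvSegs (line ++ cs), s ≠ []) →
    pvGoA line cs = (pvSegs (line ++ cs)).filter (fun l => decide (l.headD '#' ≠ '#')) := by
  intro cs
  induction cs with
  | nil => intro line h; exact absurd rfl h
  | cons c rest ih =>
      intro line _ hline hseg
      cases rest with
      | nil =>
          by_cases hc : c = '\n'
          · subst hc
            have hsegs : pvSegs (line ++ ['\n']) = [line] := by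
              have := pvSegs_append_nl line hline []
              simpa [pvSegs_nil] using this
            rw [hsegs] at hseg ⊢
            have hne : line ≠ [] := hseg line (by simp)
            obtain ⟨x, t, rfl⟩ := List.exists_cons_of_ne_nil hne
            have hx : x ≠ '\n' := fun e => hline (by simp [e])
            have hstrip : pvStripNL ((x :: t) ++ ['\n']) = x :: t :=
              pvStripNL_append_nl _ hline
            simp only [pvGoA, hstrip]
            by_cases hxh : x = '#'
            · simp [pvChkRemLine, hx, hxh]
            · simp [pvChkRemLine, hx, hxh]
          · have hnl : '\n' ∉ line ++ [c] := by
              simp [hline, Ne.symm, hc]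
            have hsegs : pvSegs (line ++ [c]) = [line ++ [c]] :=
              pvSegs_no_nl _ hnl (by simp)
            rw [hsegs]
            have hstrip : pvStripNL (line ++ [c]) = line ++ [c] :=
              pvStripNL_no_nl _ hnl
            simp only [pvGoA, hstrip]
            rcases hl : line with _ | ⟨x, t⟩
            · by_cases hch : c = '#'
              · simp [pvChkRemLine, hc, hch]
              · simp [pvChkRemLine, hc, hch]
            · have hx : x ≠ '\n' := by subst hl; exact fun e => hline (by simp [e])
              by_cases hxh : x = '#'
              · simp [pvChkRemLine, hx, hxh]
              · simp [pvChkRemLine, hx, hxh]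
      | cons r₁ r' =>
          by_cases hc : c = '\n'
          · subst hc
            have hsegs : pvSegs (line ++ '\n' :: r₁ :: r') = line :: pvSegs (r₁ :: r') :=
              pvSegs_append_nl line hline _
            rw [hsegs] at hseg ⊢
            have hne : line ≠ [] := hseg line (by simp)
            obtain ⟨x, t, rfl⟩ := List.exists_cons_of_ne_nil hne
            have hx : x ≠ '\n' := fun e => hline (by simp [e])
            have hrest := ih [] (by simp) (by simp)
              (by intro s hs; exact hseg s (List.mem_cons_of_mem _ (by simpa using hs)))
            simp only [List.nil_append] at hrest
            by_cases hxh : x = '#'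
            · simp only [pvGoA, pvChkRemLine, hx, hxh, if_false, if_true, ne_eq,
                not_true_eq_false, ite_false]
              rw [hrest]
              simp [hxh]
            · simp only [pvGoA, pvChkRemLine, hx, hxh, if_false, ne_eq, ite_false]
              rw [hrest]
              simp [hxh]
          · have hnl : '\n' ∉ line ++ [c] := by simp [hline, Ne.symm, hc]
            have hassoc : line ++ c :: r₁ :: r' = (line ++ [c]) ++ r₁ :: r' := by
              simp
            rw [hassoc] at hseg ⊢
            have := ih (line ++ [c]) (by simp) hnl hseg
            simp only [pvGoA, hc, ne_eq, not_false_eq_true, if_true]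
            exact this

theorem pvString_eq_empty_of_toList (s : String) (h : s.toList = []) : s = "" := by
  have := congrArg String.ofList h
  simpa using this

-- ===== VERDICT (by name: the statement is the Claim_ definition above) =====
theorem getLineLst_FromData_spec : Claim_equal_getLineLst_FromData := by
  intro fdata _ hpre
  unfold Spec_getLineLst_FromData
  by_cases h0 : fdata.toList = []
  · have hfe : fdata = "" := pvString_eq_empty_of_toList fdata h0
    subst hfe
    simp [getLineLst_FromData, getLineLst_FromData_alt]
  · have hseg : ∀ s ∈ pvSegs fdata.toList, s ≠ [] := by
      rcases hpre with h | h
      · exact absurd h h0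
      · exact h
    have hfe : fdata ≠ "" := fun e => h0 (by simp [e])
    unfold getLineLst_FromData getLineLst_FromData_alt
    rw [if_neg hfe]
    rw [pvFoldA fdata.toList [] []]
    rw [pvGoA_segs fdata.toList [] h0 (by simp) (by simpa using hseg)]
    simp only [List.nil_append, pvSegs]
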